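-- pv_equiv track=rewrite | github.com/BaseModelAI/cleora | pycleora/preprocess.py | filter_by_degree_edges
-- ===== SOURCE A (Python) =====
-- def filter_by_degree_edges(edges, min_degree=None, max_degree=None):
--     from collections import Counter
--     degree_count = Counter()
--     for edge in edges:
--         parts = edge.strip().split()
--         for p in parts:
--             degree_count[p] += 1
--
--     valid_nodes = set()
--     for node, deg in degree_count.items():
--         if min_degree is not None and deg < min_degree:
--             continue
--         if max_degree is not None and deg > max_degree:
--             continue
--         valid_nodes.add(node)
--
--     result = []
--     for edge in edges:
--         parts = edge.strip().split()
--         if all(p in valid_nodes for p in parts):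
--             result.append(edge.strip())
--     return result
-- ===== SOURCE B (Python) =====
-- def filter_by_degree_edges(edges, min_degree=None, max_degree=None):
--     # sort all tokens, count degrees as run lengths in the sorted list,
--     # collect the BAD tokens (bounds violated), keep edges disjoint from them
--     tokens = sorted(t for e in edges for t in e.split())
--     bad = set()
--     i = 0
--     n = len(tokens)
--     while i < n:
--         j = i + 1
--         while j < n and tokens[j] == tokens[i]:
--             j += 1
--         run = j - i
--         if (min_degree is not None and run < min_degree) or \
--            (max_degree is not None and run > max_degree):
--             bad.add(tokens[i])
--         i = j
--     return [e.strip() for e in edges if not any(t in bad for t in e.split())]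
-- ===== Notes on version B (the rewrite author's own statement) =====
-- stated objective: alternative
-- what changed: Replaces A's hash-based Counter plus valid-node set with a sort-based scheme: all tokens are sorted, degrees are read off as run lengths in the sorted list, and a complementary BAD-token set is collected; edges are kept iff disjoint from it.
import Mathlib
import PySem

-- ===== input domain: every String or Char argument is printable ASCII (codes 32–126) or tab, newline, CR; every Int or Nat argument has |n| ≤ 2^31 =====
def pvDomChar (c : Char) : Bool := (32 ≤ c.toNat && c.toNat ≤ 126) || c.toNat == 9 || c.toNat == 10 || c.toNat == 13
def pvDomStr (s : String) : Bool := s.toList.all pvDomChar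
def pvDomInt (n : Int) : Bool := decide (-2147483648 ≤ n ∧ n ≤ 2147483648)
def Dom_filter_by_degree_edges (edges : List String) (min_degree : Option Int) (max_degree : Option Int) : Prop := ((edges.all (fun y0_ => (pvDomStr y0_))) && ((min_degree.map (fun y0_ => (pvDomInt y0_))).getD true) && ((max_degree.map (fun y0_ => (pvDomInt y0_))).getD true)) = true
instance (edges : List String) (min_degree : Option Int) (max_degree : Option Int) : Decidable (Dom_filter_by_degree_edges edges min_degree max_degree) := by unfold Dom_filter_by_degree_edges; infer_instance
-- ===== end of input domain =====

-- B (alternative): instead of A's hash Counter + valid-node set, B sorts all tokens,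
-- reads degrees off as run lengths of the sorted list, collects the complementary BAD
-- set, and keeps the edges disjoint from it; same return value on every input.

-- ===== PORT A =====
def filter_by_degree_edges (edges : List String) (min_degree : Option Int) (max_degree : Option Int) : List String :=
  -- degree_count = Counter(); for edge in edges: for p in edge.strip().split(): degree_count[p] += 1
  let degree_count : PySem.Dict String Int :=
    edges.foldl (fun d edge =>
      (PySem.Str.split₀ (PySem.Str.strip edge)).foldl
        (fun d p => d.modify p 0 (· + 1)) d) PySem.Dict.empty
  -- valid_nodes = set(); for node, deg in degree_count.items(): continue/continue/add
  let valid_nodes : PySem.Set String :=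
    degree_count.items.foldl (fun s nd =>
      if (match min_degree with | some m => decide (nd.2 < m) | none => false) then s
      else if (match max_degree with | some m => decide (m < nd.2) | none => false) then s
      else PySem.Set.add s nd.1) PySem.Set.empty
  -- result = []; for edge in edges: if all(p in valid_nodes …): result.append(edge.strip())
  edges.foldl (fun result edge =>
    if (PySem.Str.split₀ (PySem.Str.strip edge)).all (fun p => PySem.Set.contains valid_nodes p)
    then result ++ [PySem.Str.strip edge] else result) []

-- ===== PORT B =====
-- Source B's while loop over the sorted token list, expressed on the suffix tokens[i:]:
-- the inner while advances j past the copies of tokens[i] (run = j - i =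
-- 1 + leading copies in the tail), a bound violation adds the token to `bad`,
-- and the outer loop continues at i = j (the suffix past the run)
def pvBadScan (min_degree max_degree : Option Int) : List String → PySem.Set String → PySem.Set String
  | [], bad => bad
  | t :: rest, bad =>
    let run : Int := 1 + (rest.takeWhile (fun x => x == t)).length
    let bad' :=
      if ((match min_degree with | some m => decide (run < m) | none => false) ||
          (match max_degree with | some m => decide (m < run) | none => false))
      then PySem.Set.add bad t else bad
    pvBadScan min_degree max_degree (rest.dropWhile (fun x => x == t)) bad'
termination_by l => l.length
decreasing_by
  have := rest.length_dropWhile_le (p := fun x => x == t)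
  simp only [List.length_cons]; omega

def filter_by_degree_edges_alt (edges : List String) (min_degree : Option Int) (max_degree : Option Int) : List String :=
  -- tokens = sorted(t for e in edges for t in e.split())
  let tokens := PySem.List.sorted (edges.flatMap PySem.Str.split₀) (fun x => x) false
  -- bad = set(); i = 0; while i < n: … (pvBadScan, scanning run by run)
  let bad := pvBadScan min_degree max_degree tokens PySem.Set.empty
  -- [e.strip() for e in edges if not any(t in bad for t in e.split())]
  (edges.filter (fun e => !((PySem.Str.split₀ e).any (fun t => PySem.Set.contains bad t)))).map PySem.Str.strip

-- ===== PRECONDITION & SPEC =====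
def Spec_filter_by_degree_edges (edges : List String) (min_degree : Option Int) (max_degree : Option Int) (out : List String) : Prop := out = filter_by_degree_edges_alt edges min_degree max_degree
instance (edges : List String) (min_degree : Option Int) (max_degree : Option Int) (out : List String) : Decidable (Spec_filter_by_degree_edges edges min_degree max_degree out) := by unfold Spec_filter_by_degree_edges; infer_instance

-- ===== CLAIM (what is proved, stated in full; the proofs are below) =====
def Claim_equal_filter_by_degree_edges : Prop := ∀ (edges : List String) (min_degree : Option Int) (max_degree : Option Int), Dom_filter_by_degree_edges edges min_degree max_degree → Spec_filter_by_degree_edges edges min_degree max_degree (filter_by_degree_edges edges min_degree max_degree)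

-- ===== LEMMAS AND PROOFS =====

-- the Bool "degree d violates a bound"
def pvViol (min_degree max_degree : Option Int) (d : Int) : Bool :=
  (match min_degree with | some m => decide (d < m) | none => false) ||
  (match max_degree with | some m => decide (m < d) | none => false)

-- running the splitter over an all-space suffix ends exactly like running it over nothing
theorem go_all_space (ws : List Char) (hws : ∀ c ∈ ws, PySem.Chars.isspace c = true) :
    ∀ cur acc, PySem.Chars.split₀.go ws cur acc = PySem.Chars.split₀.go [] cur acc := by
  induction ws with
  | nil => intro cur acc; rfl
  | cons c ws ih =>
    intro cur acc
    have hc := hws c (by simp)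
    have ih' := ih (fun x hx => hws x (by simp [hx]))
    simp only [PySem.Chars.split₀.go, hc, if_true]
    split_ifs with h <;>
      simp_all [PySem.Chars.split₀.go, ih' [] acc, ih' [] (cur.reverse :: acc)]

theorem go_append_space (xs ws : List Char) (hws : ∀ c ∈ ws, PySem.Chars.isspace c = true) :
    ∀ cur acc, PySem.Chars.split₀.go (xs ++ ws) cur acc = PySem.Chars.split₀.go xs cur acc := by
  induction xs with
  | nil => intro cur acc; simpa using go_all_space ws hws cur acc
  | cons c xs ih =>
    intro cur acc
    simp only [List.cons_append, PySem.Chars.split₀.go]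
    split_ifs <;> simp [ih]

theorem chars_split₀_rstrip (s : List Char) :
    PySem.Chars.split₀ (PySem.Chars.rstrip s) = PySem.Chars.split₀ s := by
  have hdecomp : s = PySem.Chars.rstrip s ++ (s.reverse.takeWhile PySem.Chars.isspace).reverse := by
    simp only [PySem.Chars.rstrip, ← List.reverse_append,
      List.takeWhile_append_dropWhile, List.reverse_reverse]
  have hws : ∀ c ∈ (s.reverse.takeWhile PySem.Chars.isspace).reverse, PySem.Chars.isspace c = true := by
    intro c hc
    rw [List.mem_reverse] at hc
    exact List.mem_takeWhile_imp hc
  conv_rhs => rw [hdecomp]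
  exact (go_append_space _ _ hws [] []).symm

theorem chars_split₀_lstrip (s : List Char) :
    PySem.Chars.split₀ (PySem.Chars.lstrip s) = PySem.Chars.split₀ s := by
  induction s with
  | nil => rfl
  | cons c s ih =>
    by_cases hc : PySem.Chars.isspace c = true
    · have h1 : PySem.Chars.lstrip (c :: s) = PySem.Chars.lstrip s := by
        simp [PySem.Chars.lstrip, List.dropWhile, hc]
      rw [h1, ih]
      show PySem.Chars.split₀ s = PySem.Chars.split₀.go (c :: s) [] []
      simp [PySem.Chars.split₀, PySem.Chars.split₀.go, hc]
    · simp [PySem.Chars.lstrip, List.dropWhile, hc]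

theorem chars_split₀_strip (s : List Char) :
    PySem.Chars.split₀ (PySem.Chars.strip s) = PySem.Chars.split₀ s := by
  simp only [PySem.Chars.strip]
  rw [chars_split₀_rstrip, chars_split₀_lstrip]

-- edge.strip().split() == edge.split()
theorem str_split₀_strip (s : String) :
    PySem.Str.split₀ (PySem.Str.strip s) = PySem.Str.split₀ s := by
  simp only [PySem.Str.split₀, PySem.Str.strip]
  rw [show (String.ofList (PySem.Chars.strip s.toList)).toList = PySem.Chars.strip s.toList by simp]
  rw [chars_split₀_strip]

-- membership in A's valid_nodes fold
theorem mem_valid_fold (mn mx : Option Int) (l : List (String × Int)) :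
    ∀ (s0 : PySem.Set String) (x : String),
      x ∈ l.foldl (fun s nd =>
        if (match mn with | some m => decide (nd.2 < m) | none => false) then s
        else if (match mx with | some m => decide (m < nd.2) | none => false) then s
        else PySem.Set.add s nd.1) s0 ↔
      x ∈ s0 ∨ ∃ nd ∈ l, pvViol mn mx nd.2 = false ∧ nd.1 = x := by
  induction l with
  | nil => simp
  | cons hd tl ih =>
    intro s0 x
    simp only [List.foldl_cons]
    split_ifs with h1 h2 <;>
      simp [PySem.Set.mem_add, pvViol, *, or_assoc] <;> tauto

-- membership in B's bad set: for a sorted token list, exactly the occurring tokens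
-- whose multiplicity violates a bound
theorem mem_badScan (mn mx : Option Int) :
    ∀ (l : List String) (bad : PySem.Set String), l.Pairwise (· ≤ ·) →
      ∀ (x : String),
        x ∈ pvBadScan mn mx l bad ↔
          x ∈ bad ∨ (x ∈ l ∧ pvViol mn mx (l.count x : Int) = true) := by
  intro l bad
  induction l, bad using pvBadScan.induct (min_degree := mn) (max_degree := mx) with
  | case1 bad => intro _ x; simp [pvBadScan]
  | case2 t rest bad run bad' ih =>
    intro hpw x
    have hrest : rest = rest.takeWhile (fun x => x == t) ++ rest.dropWhile (fun x => x == t) :=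
      (List.takeWhile_append_dropWhile).symm
    have htake : ∀ y ∈ rest.takeWhile (fun x => x == t), y = t := by
      intro y hy
      simpa using List.mem_takeWhile_imp hy
    have hpw_rest : rest.Pairwise (· ≤ ·) := hpw.of_cons
    have hpw_drop : (rest.dropWhile (fun x => x == t)).Pairwise (· ≤ ·) :=
      hpw_rest.sublist (List.dropWhile_sublist _)
    have ht_not_drop : t ∉ rest.dropWhile (fun x => x == t) := by
      intro hmem
      rcases hd : rest.dropWhile (fun x => x == t) with _ | ⟨d, ds⟩
      · rw [hd] at hmem; simp at hmem
      · have hdt : (d == t) = false := by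
          have := List.head_dropWhile_not (fun x => x == t) (l := rest) (by simp [hd])
          simpa [hd] using this
        have hdne : d ≠ t := by simpa using hdt
        rw [hd] at hmem hpw_drop
        rcases List.mem_cons.mp hmem with h | h
        · exact hdne h.symm
        · have hdle : d ≤ t := (List.pairwise_cons.mp hpw_drop).1 t h
          have htle : t ≤ d := (List.pairwise_cons.mp hpw).1 d
            (by rw [hrest, hd]; exact List.mem_append_right _ (by simp))
          exact hdne (le_antisymm hdle htle)
    have hct : (t :: rest).count t = 1 + (rest.takeWhile (fun x => x == t)).length := by
      rw [List.count_cons_self]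
      conv_lhs => rw [hrest]
      rw [List.count_append,
        List.count_eq_length.mpr (by intro y hy; simpa using (htake y hy).symm),
        List.count_eq_zero.mpr ht_not_drop]
      omega
    have hcx : ∀ y : String, y ≠ t →
        (t :: rest).count y = (rest.dropWhile (fun x => x == t)).count y := by
      intro y hy
      have h1 : List.count y (t :: rest) = List.count y rest := by
        simp [Ne.symm hy]
      rw [h1]
      conv_lhs => rw [hrest]
      rw [List.count_append,
        List.count_eq_zero.mpr (fun hmem => hy (htake y hmem))]
      omega
    have hmx : ∀ y : String, y ≠ t →
        (y ∈ (t :: rest) ↔ y ∈ rest.dropWhile (fun x => x == t)) := by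
      intro y hy
      constructor
      · intro hmem
        rcases List.mem_cons.mp hmem with h | h
        · exact absurd h hy
        · rw [hrest] at h
          rcases List.mem_append.mp h with h | h
          · exact absurd (htake y h) hy
          · exact h
      · intro h
        exact List.mem_cons_of_mem _ (by rw [hrest]; exact List.mem_append_right _ h)
    have hstep : pvBadScan mn mx (t :: rest) bad
        = pvBadScan mn mx (rest.dropWhile (fun x => x == t)) bad' := by
      rw [pvBadScan.eq_def]; rfl
    have hbad' : x ∈ bad' ↔ (x = t ∧ pvViol mn mx run = true) ∨ x ∈ bad := by
      show x ∈ (if _ then PySem.Set.add bad t else bad) ↔ _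
      split_ifs with h
      · rw [PySem.Set.mem_add]
        constructor
        · rintro (h' | h')
          · exact Or.inr h'
          · exact Or.inl ⟨h', by simpa [pvViol] using h⟩
        · rintro (⟨h', _⟩ | h')
          · exact Or.inr h'
          · exact Or.inl h'
      · constructor
        · exact Or.inr
        · rintro (⟨rfl, hv⟩ | h')
          · exact absurd (by simpa [pvViol] using hv) h
          · exact h'
    rw [hstep, ih hpw_drop x, hbad']
    have hrun : ((t :: rest).count t : Int) = run := by rw [hct]; push_cast; rfl
    by_cases hx : x = t
    · constructor
      · rintro ((⟨_, hv⟩ | hb) | ⟨hmem, _⟩)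
        · refine Or.inr ⟨by simp [hx], ?_⟩
          rw [hx, hrun]; exact hv
        · exact Or.inl hb
        · rw [hx] at hmem; exact absurd hmem ht_not_drop
      · rintro (hb | ⟨_, hv⟩)
        · exact Or.inl (Or.inr hb)
        · refine Or.inl (Or.inl ⟨hx, ?_⟩)
          rw [hx, hrun] at hv; exact hv
    · rw [hcx x hx, hmx x hx]
      tauto

theorem filter_by_degree_edges_spec' (edges : List String) (mn mx : Option Int) :
    filter_by_degree_edges edges mn mx = filter_by_degree_edges_alt edges mn mx := by
  unfold filter_by_degree_edges filter_by_degree_edges_alt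
  dsimp only
  set toks := edges.flatMap PySem.Str.split₀ with htoks
  -- A's counter over stripped edges counts exactly the tokens of `toks`
  have hcount :
      edges.foldl (fun d edge =>
        (PySem.Str.split₀ (PySem.Str.strip edge)).foldl
          (fun d p => d.modify p 0 (· + 1)) d) PySem.Dict.empty
      = PySem.Dict.counter toks := by
    rw [PySem.Dict.counter_eq_foldl, htoks, List.foldl_flatMap]
    apply PySem.List.foldl_congr_mem
    intro acc e _
    rw [str_split₀_strip]
  rw [hcount]
  rw [PySem.List.foldl_append_if]
  simp only [List.nil_append]
  refine congrArg (List.map PySem.Str.strip) ?_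
  apply List.filter_congr
  intro e he
  rw [str_split₀_strip]
  rw [Bool.eq_iff_iff]
  simp only [List.all_eq_true, Bool.not_eq_true', List.any_eq_false, Bool.not_eq_true]
  apply forall₂_congr
  intro p hp
  have hptok : p ∈ toks := by
    rw [htoks, List.mem_flatMap]; exact ⟨e, he, hp⟩
  have hcnts : ((PySem.List.sorted toks (fun x => x) false).count p : Int) = (toks.count p : Int) :=
    congrArg Nat.cast ((PySem.List.sorted_perm toks (fun x => x) false).count_eq p)
  have hbadmem : p ∈ pvBadScan mn mx (PySem.List.sorted toks (fun x => x) false) PySem.Set.empty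
      ↔ pvViol mn mx (toks.count p : Int) = true := by
    rw [mem_badScan mn mx _ PySem.Set.empty (PySem.List.sorted_pairwise _ _) p]
    simp [PySem.List.mem_sorted, hptok, hcnts]
  have hvalidmem : p ∈ (PySem.Set.empty : PySem.Set String) ∨
      (∃ nd ∈ (PySem.Dict.counter toks).items, pvViol mn mx nd.2 = false ∧ nd.1 = p) →
      pvViol mn mx (toks.count p : Int) = false := by
    intro h
    rcases h with h | ⟨nd, hnd, h1, rfl⟩
    · exact absurd h (by simp)
    · rw [PySem.Dict.items_counter] at hnd
      obtain ⟨k, hk, rfl⟩ := List.mem_map.mp hnd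
      exact h1
  rw [PySem.Set.contains_iff, mem_valid_fold, ← Bool.not_eq_true, PySem.Set.contains_iff, hbadmem]
  constructor
  · intro h hc
    rw [hvalidmem h] at hc
    exact Bool.false_ne_true hc
  · intro h
    refine Or.inr ⟨(p, (toks.count p : Int)), ?_, by simpa using h, rfl⟩
    rw [PySem.Dict.items_counter]
    exact List.mem_map.mpr ⟨p, by simpa [PySem.Set.mem_ofList] using hptok, rfl⟩

-- ===== VERDICT (by name: the statement is the Claim_ definition above) =====
theorem filter_by_degree_edges_spec : Claim_equal_filter_by_degree_edges := by
  intro edges mn mx _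
  exact filter_by_degree_edges_spec' edges mn mx
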